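-- pv_equiv track=rewrite | github.com/michaelprummer/datascience | clustering/clustering_version_to_add_threads/geo_locations.py | country_mapping
-- ===== SOURCE A (Python) =====
-- def country_mapping(data):
--     """
--     Mapping: country (key) - corresponding tweet ids (value list).
--     """
--     country_map = {}
--     for i in range(len(data)):
--         country = data[i][1]
--         if country in country_map.keys():
--             tmp = country_map[country]
--             tmp.append(i)
--             country_map[country] = tmp
--         else:
--             country_map[country] = [i]
--
--     return country_map
-- ===== SOURCE B (Python) =====
-- def country_mapping(data):
--     """
--     Mapping: country (key) - corresponding tweet ids (value list).
--     """
--     order = list(dict.fromkeys(country for _, country in data))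
--     return {c: [i for i, (_, country) in enumerate(data) if country == c]
--             for c in order}
-- ===== Notes on version B (the rewrite author's own statement) =====
-- stated objective: simpler
-- what changed: Replaces the index-loop that accumulates lists in a dict (lookup, append, re-store) with a two-pass scheme: first dedup the countries in first-occurrence order, then a dict comprehension that collects each country's indices with a filtered enumerate scan.
import Mathlib
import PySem

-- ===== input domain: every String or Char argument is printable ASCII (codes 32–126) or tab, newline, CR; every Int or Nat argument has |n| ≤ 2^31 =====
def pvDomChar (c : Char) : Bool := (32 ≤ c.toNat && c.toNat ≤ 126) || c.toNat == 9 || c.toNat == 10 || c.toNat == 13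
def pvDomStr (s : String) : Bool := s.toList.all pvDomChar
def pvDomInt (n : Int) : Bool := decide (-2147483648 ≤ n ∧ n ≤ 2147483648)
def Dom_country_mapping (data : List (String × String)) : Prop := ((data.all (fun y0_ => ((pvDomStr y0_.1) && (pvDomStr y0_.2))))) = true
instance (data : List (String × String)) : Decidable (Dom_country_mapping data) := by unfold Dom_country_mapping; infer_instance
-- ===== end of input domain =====

-- B replaces A's dict-accumulation index loop by dedup of the countries plus a per-country
-- filtered enumerate scan (a simpler two-pass decomposition; not faster).


-- ===== PORT A =====
-- the body of A's for-loop, as a named helper (one iteration at index i)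
def pvStepA (data : List (String × String))
    (m : PySem.Dict String (List Int)) (i : Int) : PySem.Dict String (List Int) :=
  match PySem.List.pyGet? data i with
  | none => m  -- unreachable guard: i ranges over the valid indices of data
  | some p =>
    let country := p.2
    if m.contains country then
      let tmp := m.getD country []
      m.insert country (tmp ++ [i])
    else
      m.insert country [i]

def country_mapping (data : List (String × String)) : List (String × List Int) :=
  (List.foldl (pvStepA data) PySem.Dict.empty
    (PySem.List.pyRange 0 (PySem.List.len data) 1)).items

-- ===== PORT B =====
def country_mapping_alt (data : List (String × String)) : List (String × List Int) :=
  let order := PySem.List.dedup (data.map (fun p => p.2))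
  (List.foldl (fun d c =>
      d.insert c ((PySem.List.enumerate data 0).filterMap
        (fun q => if q.2.2 = c then some q.1 else none)))
    PySem.Dict.empty order).items

-- ===== PRECONDITION & SPEC =====
def Spec_country_mapping (data : List (String × String)) (out : List (String × List Int)) : Prop := out = country_mapping_alt data
instance (data : List (String × String)) (out : List (String × List Int)) : Decidable (Spec_country_mapping data out) := by unfold Spec_country_mapping; infer_instance

-- ===== CLAIM (what is proved, stated in full; the proofs are below) =====
def Claim_equal_country_mapping : Prop := ∀ (data : List (String × String)), Dom_country_mapping data → Spec_country_mapping data (country_mapping data)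

-- ===== LEMMAS AND PROOFS =====

-- indices whose country equals c, as B's comprehension computes them
def pvIdx (data : List (String × String)) (c : String) : List Int :=
  (PySem.List.enumerate data 0).filterMap (fun q => if q.2.2 = c then some q.1 else none)

-- common normal form of both programs
def pvCanon (data : List (String × String)) : List (String × List Int) :=
  (PySem.List.dedup (data.map (fun p => p.2))).map (fun c => (c, pvIdx data c))

theorem pv_foldl_insert_items (order : List String) (v : String → List Int)
    (d : PySem.Dict String (List Int)) (hnd : order.Nodup)
    (hdisj : ∀ c ∈ order, d.contains c = false) :
    (List.foldl (fun d c => d.insert c (v c)) d order).items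
      = d.items ++ order.map (fun c => (c, v c)) := by
  induction order generalizing d with
  | nil => simp
  | cons c t ih =>
    simp only [List.foldl_cons, List.map_cons]
    rw [ih _ (List.Nodup.of_cons hnd) ?disj]
    case disj =>
      intro c' hc'
      rw [PySem.Dict.contains_insert]
      have hne : c' ≠ c := by
        rintro rfl; exact (List.nodup_cons.mp hnd).1 hc'
      simp [hne, hdisj c' (List.mem_cons_of_mem _ hc')]
    rw [PySem.Dict.items_insert_of_not_contains d (v c) (hdisj c (by simp))]
    simp

theorem pv_alt_eq_canon (data : List (String × String)) :
    country_mapping_alt data = pvCanon data := by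
  unfold country_mapping_alt pvCanon pvIdx
  rw [pv_foldl_insert_items _ _ _ (by simp [PySem.List.dedup_eq_ofList, PySem.Set.nodup_ofList])
    (by intro c _; exact PySem.Dict.contains_empty c)]
  simp [PySem.Dict.empty]

theorem pv_idx_append (data : List (String × String)) (x : String × String) (c : String) :
    pvIdx (data ++ [x]) c
      = pvIdx data c ++ (if x.2 = c then [(data.length : Int)] else []) := by
  unfold pvIdx
  rw [PySem.List.enumerate_append]
  simp only [List.filterMap_append, PySem.List.enumerate_cons, PySem.List.enumerate_nil]
  by_cases h : x.2 = c <;> simp [h]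

theorem pv_idx_nil_of_not_mem (data : List (String × String)) (c : String)
    (h : c ∉ data.map (fun p => p.2)) : pvIdx data c = [] := by
  unfold pvIdx
  rw [List.filterMap_eq_nil_iff]
  intro q hq
  rcases (PySem.List.mem_enumerate_iff data 0 q).mp hq with ⟨k, hk, rfl⟩
  have hmem : data[k].2 ∈ data.map (fun p => p.2) := List.mem_map_of_mem (List.getElem_mem hk)
  have hne : data[k].2 ≠ c := fun he => h (he ▸ hmem)
  simp [hne]

theorem pv_dedup_append (L : List String) (x : String) :
    PySem.List.dedup (L ++ [x])
      = PySem.List.dedup L ++ (if x ∈ PySem.List.dedup L then [] else [x]) := by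
  simp only [PySem.List.dedup_eq_ofList, PySem.Set.ofList, List.foldl_append, List.foldl_cons,
    List.foldl_nil, PySem.Set.add, PySem.Set.contains, PySem.Set.empty]
  split_ifs with h h' h' <;> simp_all

theorem pv_stepA_last (data : List (String × String)) (x : String × String)
    (m : PySem.Dict String (List Int)) :
    pvStepA (data ++ [x]) m (data.length : Int)
      = if m.contains x.2 then m.insert x.2 (m.getD x.2 [] ++ [(data.length : Int)])
        else m.insert x.2 [(data.length : Int)] := by
  unfold pvStepA
  rw [PySem.List.pyGet?_natCast, List.getElem?_concat_length]

theorem pv_stepA_prefix (data : List (String × String)) (x : String × String)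
    (m : PySem.Dict String (List Int)) (i : Int) (hi : i ∈ PySem.List.pyRange 0 (data.length : Int) 1) :
    pvStepA (data ++ [x]) m i = pvStepA data m i := by
  rcases PySem.List.mem_pyRange_one.mp hi with ⟨h0, hlt⟩
  lift i to ℕ using h0 with k
  have hk : k < data.length := by exact_mod_cast hlt
  unfold pvStepA
  rw [PySem.List.pyGet?_natCast, PySem.List.pyGet?_natCast, List.getElem?_append_left hk]

theorem pv_A_eq_canon (data : List (String × String)) :
    country_mapping data = pvCanon data := by
  induction data using List.reverseRecOn with
  | nil => decide
  | append_singleton data x ih =>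
    unfold country_mapping at ih ⊢
    simp only [PySem.List.len, List.length_append, List.length_cons, List.length_nil,
      Nat.cast_add, Nat.cast_one, zero_add] at ih ⊢
    rw [PySem.List.pyRange_one_succ_right (by positivity), List.foldl_append,
      PySem.List.foldl_congr_mem _ (pvStepA (data ++ [x])) (pvStepA data) _
        (fun acc i hi => pv_stepA_prefix data x acc i hi),
      List.foldl_cons, List.foldl_nil, pv_stepA_last]
    set FD := List.foldl (pvStepA data) PySem.Dict.empty
      (PySem.List.pyRange 0 (data.length : Int) 1) with hFD
    have hkeys : FD.keys = PySem.List.dedup (data.map fun p => p.2) := by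
      simp [PySem.Dict.keys, ih, pvCanon, Function.comp_def]
    have hnodup : FD.keys.Nodup := by
      rw [hkeys, PySem.List.dedup_eq_ofList]; exact PySem.Set.nodup_ofList _
    have hcont : FD.contains x.2 = true ↔ x.2 ∈ data.map (fun p => p.2) := by
      rw [PySem.Dict.contains_iff_mem_keys, hkeys, PySem.List.dedup_eq_ofList,
        PySem.Set.mem_ofList]
    have hcanon : pvCanon (data ++ [x])
        = (PySem.List.dedup (data.map (fun p => p.2) ++ [x.2])).map
            (fun c => (c, pvIdx (data ++ [x]) c)) := by
      unfold pvCanon; rw [List.map_append]; rfl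
    by_cases hm : x.2 ∈ data.map (fun p => p.2)
    · rw [if_pos (hcont.mpr hm), PySem.Dict.items_insert_of_contains _ _ (hcont.mpr hm)]
      have hmemitems : (x.2, pvIdx data x.2) ∈ FD.items := by
        rw [ih]
        exact List.mem_map_of_mem (by rw [PySem.List.dedup_eq_ofList, PySem.Set.mem_ofList]; exact hm)
      have hget : FD.getD x.2 [] = pvIdx data x.2 :=
        PySem.Dict.getD_of_mem_items FD hmemitems hnodup []
      rw [hget, ih, hcanon, pv_dedup_append,
        if_pos (by rw [PySem.List.dedup_eq_ofList, PySem.Set.mem_ofList]; exact hm),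
        List.append_nil]
      unfold pvCanon
      rw [List.map_map]
      apply List.map_congr_left
      intro c hc
      by_cases hcx : c = x.2
      · subst hcx
        simp [pv_idx_append]
      · have : ¬ (x.2 = c) := fun he => hcx he.symm
        simp [pv_idx_append, hcx, this]
    · have hcontf : FD.contains x.2 = false := by
        rw [Bool.eq_false_iff]; intro hc; exact hm (hcont.mp hc)
      rw [if_neg (by simp [hcontf]), PySem.Dict.items_insert_of_not_contains _ _ hcontf, ih,
        hcanon, pv_dedup_append,
        if_neg (by rw [PySem.List.dedup_eq_ofList, PySem.Set.mem_ofList]; exact hm),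
        List.map_append]
      congr 1
      · unfold pvCanon
        apply List.map_congr_left
        intro c hc
        have hcm : c ∈ data.map (fun p => p.2) := by
          rw [PySem.List.dedup_eq_ofList, PySem.Set.mem_ofList] at hc; exact hc
        have hne : ¬ (x.2 = c) := fun he => hm (he ▸ hcm)
        simp [pv_idx_append, hne]
      · rw [List.map_cons, List.map_nil, pv_idx_append, pv_idx_nil_of_not_mem data x.2 hm]
        simp

-- ===== VERDICT (by name: the statement is the Claim_ definition above) =====
theorem country_mapping_spec : Claim_equal_country_mapping := by
  intro data _
  unfold Spec_country_mapping
  rw [pv_A_eq_canon, pv_alt_eq_canon]
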